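-- pv_equiv track=rewrite | github.com/joelliusczar/app_generator | template/src/python/libs/dtos_and_utilities/simple_functions.py | squash_sequential_duplicates
-- ===== SOURCE A (Python) =====
-- from typing import (
-- 	Any,
-- 	Hashable,
-- 	Iterable,
-- 	Iterator,
-- 	Optional,
-- 	Tuple,
-- 	overload,
-- 	TypeVar,
-- 	Union
-- )
--
-- T = TypeVar("T")
--
-- def squash_sequential_duplicates(
-- 	compressura: Iterable[T],
-- 	pattern: T
-- ) -> Iterator[T]:
-- 	cIter = iter(compressura)
-- 	previous = next(cIter)
-- 	yield previous
-- 	for element in cIter: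
-- 		if element == previous and element == pattern:
-- 			continue
-- 		previous = element
-- 		yield element
-- ===== SOURCE B (Python) =====
-- # Run-segmentation: split the sequence into maximal runs of equal elements;
-- # a run equal to the pattern is emitted once, any other run is emitted whole.
-- # Return-value equivalence only (both functions are generators).
-- def squash_sequential_duplicates(compressura, pattern):
-- 	items = list(compressura)
-- 	i, n = 0, len(items)
-- 	while i < n:
-- 		j = i + 1
-- 		while j < n and items[j] == items[i]:
-- 			j += 1
-- 		if items[i] == pattern:
-- 			yield pattern
-- 		else:
-- 			yield from items[i:j]
-- 		i = j
-- ===== Notes on version B (the rewrite author's own statement) =====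
-- stated objective: alternative
-- what changed: Replaces A's tracked-previous per-element skip stream with run-segmentation: the list is cut into maximal runs of equal elements, a run equal to the pattern is emitted once and every other run is emitted whole; return-value equivalence only (both are generators).
import Mathlib
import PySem

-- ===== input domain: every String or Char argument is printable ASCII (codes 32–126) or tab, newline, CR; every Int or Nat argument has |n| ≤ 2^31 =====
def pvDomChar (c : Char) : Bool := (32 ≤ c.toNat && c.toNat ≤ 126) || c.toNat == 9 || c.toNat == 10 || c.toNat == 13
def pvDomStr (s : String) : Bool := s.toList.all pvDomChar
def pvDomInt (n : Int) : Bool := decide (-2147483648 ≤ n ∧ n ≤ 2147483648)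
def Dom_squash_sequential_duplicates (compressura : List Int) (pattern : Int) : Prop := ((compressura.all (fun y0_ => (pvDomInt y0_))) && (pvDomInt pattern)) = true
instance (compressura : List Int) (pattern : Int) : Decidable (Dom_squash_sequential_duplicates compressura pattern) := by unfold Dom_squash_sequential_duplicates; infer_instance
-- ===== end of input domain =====

-- B replaces A's tracked-previous per-element skip with run-segmentation (emit a
-- pattern-run once, other runs whole); equivalence is about return values only
-- (both Pythons are generators).

-- ===== PORT A =====
def squash_sequential_duplicates (compressura : List Int) (pattern : Int) : List Int :=
  match compressura with
  | [] => []  -- unreached under Pre_: Python A raises RuntimeError here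
  | previous :: rest =>
    (rest.foldl (fun (st : Int × List Int) (element : Int) =>
        if element == st.1 && element == pattern then st
        else (element, st.2 ++ [element])) (previous, [previous])).2

-- ===== PORT B =====
-- B's outer while-loop: take the maximal run at the head (inner j-scan =
-- takeWhile/dropWhile), emit it (once if it is the pattern), recurse on the rest.
def sqRuns (pattern : Int) : List Int → List Int
  | [] => []
  | x :: xs =>
      (if x = pattern then [x] else x :: xs.takeWhile (fun y => y == x))
        ++ sqRuns pattern (xs.dropWhile (fun y => y == x))
  termination_by xs => xs.length
  decreasing_by
    simpa using Nat.lt_succ_of_le (List.length_dropWhile_le _ _)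

def squash_sequential_duplicates_alt (compressura : List Int) (pattern : Int) : List Int :=
  sqRuns pattern compressura

-- ===== PRECONDITION & SPEC =====
-- Pre_ excludes only the empty list, on which Python A's generator raises RuntimeError
-- (StopIteration from the eager next(), PEP 479) when iterated; B yields nothing there.
def Pre_squash_sequential_duplicates (compressura : List Int) (pattern : Int) : Prop :=
  compressura ≠ []
instance (compressura : List Int) (pattern : Int) : Decidable (Pre_squash_sequential_duplicates compressura pattern) := by unfold Pre_squash_sequential_duplicates; infer_instance
def pvWitness_squash_sequential_duplicates : List Int × Int := ([1, 1, 2], 1)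

def Spec_squash_sequential_duplicates (compressura : List Int) (pattern : Int) (out : List Int) : Prop := out = squash_sequential_duplicates_alt compressura pattern
instance (compressura : List Int) (pattern : Int) (out : List Int) : Decidable (Spec_squash_sequential_duplicates compressura pattern out) := by unfold Spec_squash_sequential_duplicates; infer_instance

-- ===== CLAIM (what is proved, stated in full; the proofs are below) =====
def Claim_equal_squash_sequential_duplicates : Prop := ∀ (compressura : List Int) (pattern : Int), Dom_squash_sequential_duplicates compressura pattern → Pre_squash_sequential_duplicates compressura pattern → Spec_squash_sequential_duplicates compressura pattern (squash_sequential_duplicates compressura pattern)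

-- ===== LEMMAS AND PROOFS =====

-- A's loop, written recursively (prev = last yielded element).
def sqLoopA (pattern prev : Int) : List Int → List Int
  | [] => []
  | x :: xs => if x = prev ∧ x = pattern then sqLoopA pattern prev xs
               else x :: sqLoopA pattern x xs

lemma foldA_eq (pattern : Int) : ∀ (xs : List Int) (prev : Int) (acc : List Int),
    (xs.foldl (fun (st : Int × List Int) (element : Int) =>
        if element == st.1 && element == pattern then st
        else (element, st.2 ++ [element])) (prev, acc)).2
      = acc ++ sqLoopA pattern prev xs := by
  intro xs
  induction xs with
  | nil => simp [sqLoopA]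
  | cons x xs ih =>
    intro prev acc
    by_cases h : x = prev ∧ x = pattern
    · have hb : (x == prev && x == pattern) = true := by simp [h.1 ▸ h.2, h.2]
      simp only [List.foldl, hb, if_true, sqLoopA, if_pos h]
      exact ih prev acc
    · have hb : (x == prev && x == pattern) = false := by
        rcases not_and_or.mp h with h' | h' <;> simp [h']
      simp only [List.foldl, hb, Bool.false_eq_true, if_false, sqLoopA, if_neg h]
      rw [ih x (acc ++ [x])]
      simp

-- A's stream, seeded with the first element, equals B's run-segmentation.
lemma loopA_eq_runs (pattern : Int) : ∀ (xs : List Int) (prev : Int),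
    prev :: sqLoopA pattern prev xs = sqRuns pattern (prev :: xs) := by
  intro xs
  induction xs with
  | nil =>
    intro prev
    by_cases h : prev = pattern <;> simp [sqLoopA, sqRuns, h]
  | cons x xs ih =>
    intro prev
    by_cases hp : prev = pattern
    · by_cases hx : x = pattern
      · have hskip : sqLoopA pattern prev (x :: xs) = sqLoopA pattern prev xs := by
          simp [sqLoopA, hx, hp]
        have hb : (x == prev) = true := by simp [hx, hp]
        calc prev :: sqLoopA pattern prev (x :: xs)
            = prev :: sqLoopA pattern prev xs := by rw [hskip]
          _ = sqRuns pattern (prev :: xs) := ih prev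
          _ = sqRuns pattern (prev :: x :: xs) := by
              simp only [sqRuns, if_pos hp]
              congr 1
              simp [hb]
      · have hb : (x == prev) = false := by
          simp only [beq_eq_false_iff_ne]
          exact fun h => hx (h.trans hp)
        have hstep : sqLoopA pattern prev (x :: xs) = x :: sqLoopA pattern x xs := by
          simp [sqLoopA, hx]
        rw [hstep, ih x]
        conv_rhs => rw [sqRuns]
        rw [if_pos hp]
        simp [hb]
    · by_cases hx : x = prev
      · have hxp : x ≠ pattern := fun h => hp (hx ▸ h)
        have hstep : sqLoopA pattern prev (x :: xs) = x :: sqLoopA pattern x xs := by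
          simp [sqLoopA, hxp]
        have ih2 := ih prev
        rw [sqRuns, if_neg hp] at ih2
        simp only [List.cons_append, List.cons.injEq, true_and] at ih2
        rw [hstep]
        subst hx
        conv_rhs => rw [sqRuns]
        rw [if_neg hp]
        simp only [List.takeWhile_cons, List.dropWhile_cons, beq_self_eq_true, if_true,
          List.cons_append, List.cons.injEq, true_and]
        exact ih2
      · have hb : (x == prev) = false := by
          simp only [beq_eq_false_iff_ne]; exact hx
        have hstep : sqLoopA pattern prev (x :: xs) = x :: sqLoopA pattern x xs := by
          have : ¬ (x = prev ∧ x = pattern) := fun h => hx h.1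
          simp [sqLoopA, this]
        rw [hstep, ih x]
        conv_rhs => rw [sqRuns]
        rw [if_neg hp]
        simp [List.takeWhile_cons, hb]

-- ===== VERDICT (by name: the statement is the Claim_ definition above) =====
theorem squash_sequential_duplicates_spec : Claim_equal_squash_sequential_duplicates := by
  intro compressura pattern _ hpre
  unfold Spec_squash_sequential_duplicates
  match compressura with
  | [] => exact absurd rfl hpre
  | first :: rest =>
    show (rest.foldl _ (first, [first])).2 = _
    rw [foldA_eq]
    show first :: sqLoopA pattern first rest = _
    rw [loopA_eq_runs]
    rfl
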